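-- pv_equiv track=rewrite | github.com/marcosadrianoti/tb-python-profiler | tests/actions/test_show_disk_usage.py | get_list_order_by_id
-- ===== SOURCE A (Python) =====
-- def get_list_order_by_id(out_disk_usage, files):
--     list_files = []
--     for file in files:
--         if file in out_disk_usage:
--             index = out_disk_usage.index(file)
--             list_files.append((file, index))
--     list_files.sort(key=lambda x: x[1])
--     return [file for file, _ in list_files]
-- ===== SOURCE B (Python) =====
-- def get_list_order_by_id(out_disk_usage, files):
--     result = []
--     seen = []
--     for x in out_disk_usage:
--         if x in seen:
--             continue
--         seen.append(x)
--         result += [x] * files.count(x)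
--     return result
-- ===== Notes on version B (the rewrite author's own statement) =====
-- stated objective: simpler
-- what changed: B walks out_disk_usage in first-occurrence order with a seen list and emits each value repeated files.count(x) times, replacing A's (file,index) pair list plus stable sort entirely.
import Mathlib
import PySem

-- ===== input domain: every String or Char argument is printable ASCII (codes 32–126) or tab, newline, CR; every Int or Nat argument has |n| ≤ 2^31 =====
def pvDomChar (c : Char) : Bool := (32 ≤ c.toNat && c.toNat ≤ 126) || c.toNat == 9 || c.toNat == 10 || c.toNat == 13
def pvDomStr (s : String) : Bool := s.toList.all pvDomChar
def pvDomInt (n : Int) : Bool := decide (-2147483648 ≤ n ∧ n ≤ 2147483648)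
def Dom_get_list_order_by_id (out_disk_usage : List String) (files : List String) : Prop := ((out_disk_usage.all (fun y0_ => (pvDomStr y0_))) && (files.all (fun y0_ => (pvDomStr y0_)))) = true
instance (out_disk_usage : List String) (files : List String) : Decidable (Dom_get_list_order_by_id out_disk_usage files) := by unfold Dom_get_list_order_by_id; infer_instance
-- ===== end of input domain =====

-- B replaces A's (file, index) pair list plus stable sort by a single walk over
-- out_disk_usage in first-occurrence order with a seen list, emitting each value
-- files.count(x) times (objective: simpler).

-- ===== PORT A =====
def get_list_order_by_id (out_disk_usage : List String) (files : List String) : List String :=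
  let list_files : List (String × Nat) :=
    files.foldl (fun acc file =>
      if out_disk_usage.contains file then
        match PySem.List.index? out_disk_usage file with
        | some index => acc ++ [(file, index)]
        | none => acc
      else acc) []
  (PySem.List.sorted list_files (fun x => x.2) false).map (fun x => x.1)

-- ===== PORT B =====
def get_list_order_by_id_alt (out_disk_usage : List String) (files : List String) : List String :=
  (out_disk_usage.foldl (fun st x =>
      if st.1.contains x then st
      else (st.1 ++ [x], st.2 ++ List.replicate (PySem.List.count files x) x))
    (([] : List String), ([] : List String))).2

-- ===== PRECONDITION & SPEC =====
def Spec_get_list_order_by_id (out_disk_usage : List String) (files : List String) (out : List String) : Prop := out = get_list_order_by_id_alt out_disk_usage files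
instance (out_disk_usage : List String) (files : List String) (out : List String) : Decidable (Spec_get_list_order_by_id out_disk_usage files out) := by unfold Spec_get_list_order_by_id; infer_instance

-- ===== CLAIM (what is proved, stated in full; the proofs are below) =====
def Claim_equal_get_list_order_by_id : Prop := ∀ (out_disk_usage : List String) (files : List String), Dom_get_list_order_by_id out_disk_usage files → Spec_get_list_order_by_id out_disk_usage files (get_list_order_by_id out_disk_usage files)

-- ===== LEMMAS AND PROOFS =====

-- first-occurrence dedup of xs relative to an already-seen list (proof-side model of B's loop)
def pvD (xs seen : List String) : List String :=
  match xs with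
  | [] => []
  | x :: rest => if seen.contains x then pvD rest seen else x :: pvD rest (seen ++ [x])

lemma mem_pvD : ∀ (xs seen : List String) (a : String), a ∈ pvD xs seen ↔ (a ∈ xs ∧ a ∉ seen) := by
  intro xs
  induction xs with
  | nil => simp [pvD]
  | cons x rest ih =>
    intro seen a
    by_cases hx : seen.contains x = true
    · have hxs : x ∈ seen := by simpa using hx
      simp only [pvD, if_pos hx, ih, List.mem_cons]
      constructor
      · rintro ⟨h1, h2⟩; exact ⟨Or.inr h1, h2⟩
      · rintro ⟨(rfl | h), h2⟩
        · exact absurd hxs h2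
        · exact ⟨h, h2⟩
    · have hxs : x ∉ seen := by simpa using hx
      simp only [pvD, if_neg hx, List.mem_cons, ih, List.mem_append]
      constructor
      · rintro (rfl | ⟨h1, h2⟩)
        · exact ⟨Or.inl rfl, hxs⟩
        · exact ⟨Or.inr h1, fun h => h2 (Or.inl h)⟩
      · rintro ⟨(rfl | h1), h2⟩
        · exact Or.inl rfl
        · by_cases hax : a = x
          · exact Or.inl hax
          · refine Or.inr ⟨h1, ?_⟩
            rintro (h | h | h)
            · exact h2 h
            · exact hax h
            · exact absurd h (List.not_mem_nil)

-- python's list.index over a prefix the value avoids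
lemma index?_append_of_not_mem : ∀ (l t : List String) (v : String), v ∉ l →
    PySem.List.index? (l ++ t) v = (PySem.List.index? t v).map (· + l.length) := by
  intro l
  induction l with
  | nil => intro t v _; simp [Option.map_id']
  | cons x l ih =>
    intro t v hv
    have hne : x ≠ v := fun h => hv (by simp [h])
    rw [List.cons_append, PySem.List.index?_cons_of_ne _ hne, ih t v (fun h => hv (by simp [h]))]
    cases PySem.List.index? t v
    · simp
    · simp; omega

-- elements of pvD, in order, have strictly increasing first-occurrence indices
lemma pvD_pairwise_idx : ∀ (suf pre seen : List String), (∀ x : String, (x ∈ seen) ↔ x ∈ pre) →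
    (pvD suf seen).Pairwise (fun a b =>
      (PySem.List.index? (pre ++ suf) a).getD 0 < (PySem.List.index? (pre ++ suf) b).getD 0) := by
  intro suf
  induction suf with
  | nil => intro pre seen h; simp [pvD]
  | cons x rest ih =>
    intro pre seen h
    by_cases hx : seen.contains x = true
    · rw [pvD, if_pos hx]
      have hxpre : x ∈ pre := (h x).mp (by simpa using hx)
      have h' : ∀ y : String, (y ∈ seen) ↔ y ∈ pre ++ [x] := by
        intro y
        rw [h y]
        simp only [List.mem_append, List.mem_singleton]
        constructor
        · exact Or.inl
        · rintro (hy | rfl)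
          · exact hy
          · exact hxpre
      have := ih (pre ++ [x]) seen h'
      simpa [List.append_assoc] using this
    · have hxseen : x ∉ seen := by simpa using hx
      have hxpre : x ∉ pre := fun hp => hxseen ((h x).mpr hp)
      rw [pvD, if_neg hx]
      have h' : ∀ y : String, (y ∈ seen ++ [x]) ↔ y ∈ pre ++ [x] := by
        intro y; simp [h y]
      have tail := ih (pre ++ [x]) (seen ++ [x]) h'
      rw [List.append_assoc] at tail
      simp only [List.singleton_append] at tail
      refine List.Pairwise.cons ?_ tail
      intro b hb
      have hix : PySem.List.index? (pre ++ x :: rest) x = some pre.length := by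
        rw [index?_append_of_not_mem _ _ _ hxpre, PySem.List.index?_cons_self]; simp
      have hbmem := (mem_pvD _ _ _).mp hb
      have hbx : b ≠ x := fun hh => hbmem.2 (by simp [hh])
      have hbpre : b ∉ pre := fun hp => hbmem.2 (by simp [(h b).mpr hp])
      obtain ⟨k, hk⟩ := Option.isSome_iff_exists.mp
        ((PySem.List.index?_isSome_iff rest b).mpr hbmem.1)
      have hib : PySem.List.index? (pre ++ x :: rest) b = some (k + 1 + pre.length) := by
        rw [index?_append_of_not_mem _ _ _ hbpre,
          PySem.List.index?_cons_of_ne _ (Ne.symm hbx), hk]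
        simp
      rw [hix, hib]
      simp

lemma pvD_nodup (out : List String) : (pvD out []).Nodup := by
  have h := pvD_pairwise_idx out [] [] (by simp)
  simp only [List.nil_append] at h
  exact h.imp (fun {a b} hlt => fun heq => by subst heq; exact absurd hlt (lt_irrefl _))

-- A's accumulation loop builds the (file, index) pairs of the present files
lemma foldA_eq (out : List String) : ∀ (fs : List String) (acc : List (String × Nat)),
    fs.foldl (fun acc file =>
      if out.contains file then
        match PySem.List.index? out file with
        | some index => acc ++ [(file, index)]
        | none => acc
      else acc) acc
    = acc ++ (fs.filter (fun f => out.contains f)).map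
        (fun f => (f, (PySem.List.index? out f).getD 0)) := by
  intro fs
  induction fs with
  | nil => simp
  | cons f fs ih =>
    intro acc
    by_cases hc : out.contains f = true
    · have hmem : f ∈ out := by simpa using hc
      obtain ⟨i, hi⟩ := Option.isSome_iff_exists.mp ((PySem.List.index?_isSome_iff out f).mpr hmem)
      simp only [List.foldl_cons, List.filter_cons, hc, if_pos, hi, ih, List.map_cons]
      simp
    · simp only [List.foldl_cons, List.filter_cons, hc, ih]
      simp

-- B's loop emits, for each first occurrence, the value repeated files.count-many times
lemma foldB_eq (files : List String) : ∀ (xs seen acc : List String),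
    (xs.foldl (fun st x =>
      if st.1.contains x then st
      else (st.1 ++ [x], st.2 ++ List.replicate (PySem.List.count files x) x)) (seen, acc)).2
    = acc ++ (pvD xs seen).flatMap (fun x => List.replicate (PySem.List.count files x) x) := by
  intro xs
  induction xs with
  | nil => simp [pvD]
  | cons x rest ih =>
    intro seen acc
    by_cases hx : seen.contains x = true
    · simp only [List.foldl_cons, pvD, if_pos hx, ih]
    · simp only [List.foldl_cons, pvD, if_neg hx, ih, List.flatMap_cons, List.append_assoc]

-- A's pair list is a permutation of B's grouped pair list
lemma perm_Rp_Q (out : List String) : ∀ (fs : List String),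
    ((pvD out []).flatMap (fun x =>
        List.replicate (PySem.List.count fs x) (x, (PySem.List.index? out x).getD 0))).Perm
    ((fs.filter (fun f => out.contains f)).map (fun f => (f, (PySem.List.index? out f).getD 0))) := by
  intro fs
  induction fs with
  | nil =>
    have hnil : (pvD out []).flatMap (fun x =>
        List.replicate (PySem.List.count ([] : List String) x)
          (x, (PySem.List.index? out x).getD 0)) = [] := by
      simp [PySem.List.count_eq]
    rw [hnil]; simp
  | cons f fs ih =>
    by_cases hc : out.contains f = true
    · have hfo : f ∈ out := by simpa using hc
      have hfD : f ∈ pvD out [] := (mem_pvD _ _ _).mpr ⟨hfo, by simp⟩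
      obtain ⟨l1, l2, hsplit⟩ := List.append_of_mem hfD
      have hnd := pvD_nodup out
      rw [hsplit] at hnd
      have hnd' := List.nodup_append.mp hnd
      have hf1 : f ∉ l1 := fun h1 => hnd'.2.2 f h1 f List.mem_cons_self rfl
      have hf2 : f ∉ l2 := (List.nodup_cons.mp hnd'.2.1).1
      have hcongr : ∀ (l : List String), f ∉ l →
          l.flatMap (fun x => List.replicate (PySem.List.count (f :: fs) x)
            (x, (PySem.List.index? out x).getD 0))
          = l.flatMap (fun x => List.replicate (PySem.List.count fs x)
            (x, (PySem.List.index? out x).getD 0)) := by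
        intro l hfl
        refine List.flatMap_congr (fun x hx => ?_)
        have hne : ¬ (f = x) := fun h => hfl (h ▸ hx)
        simp [PySem.List.count_eq, hne]
      have hgroup : List.replicate (PySem.List.count (f :: fs) f)
            ((f, (PySem.List.index? out f).getD 0))
          = (f, (PySem.List.index? out f).getD 0)
            :: List.replicate (PySem.List.count fs f) ((f, (PySem.List.index? out f).getD 0)) := by
        simp [PySem.List.count_eq, List.replicate_succ]
      rw [hsplit, List.flatMap_append, List.flatMap_cons, hcongr l1 hf1, hcongr l2 hf2, hgroup,
        List.filter_cons_of_pos hc, List.map_cons]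
      have hshape : (l1.flatMap (fun x => List.replicate (PySem.List.count fs x)
              (x, (PySem.List.index? out x).getD 0)))
            ++ (((f, (PySem.List.index? out f).getD 0)
                :: List.replicate (PySem.List.count fs f) ((f, (PySem.List.index? out f).getD 0)))
              ++ l2.flatMap (fun x => List.replicate (PySem.List.count fs x)
                (x, (PySem.List.index? out x).getD 0)))
          = (l1.flatMap (fun x => List.replicate (PySem.List.count fs x)
              (x, (PySem.List.index? out x).getD 0)))
            ++ (f, (PySem.List.index? out f).getD 0)
            :: (List.replicate (PySem.List.count fs f) ((f, (PySem.List.index? out f).getD 0))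
              ++ l2.flatMap (fun x => List.replicate (PySem.List.count fs x)
                (x, (PySem.List.index? out x).getD 0))) := by
        simp
      rw [hshape]
      refine List.Perm.trans List.perm_middle (List.Perm.cons _ ?_)
      have hback : (pvD out []).flatMap (fun x => List.replicate (PySem.List.count fs x)
            (x, (PySem.List.index? out x).getD 0))
          = (l1.flatMap (fun x => List.replicate (PySem.List.count fs x)
              (x, (PySem.List.index? out x).getD 0)))
            ++ (List.replicate (PySem.List.count fs f) ((f, (PySem.List.index? out f).getD 0))
              ++ l2.flatMap (fun x => List.replicate (PySem.List.count fs x)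
                (x, (PySem.List.index? out x).getD 0))) := by
        rw [hsplit, List.flatMap_append, List.flatMap_cons]
      rw [← hback]
      exact ih
    · have hfo : f ∉ out := by simpa using hc
      have hcongr :
          (pvD out []).flatMap (fun x => List.replicate (PySem.List.count (f :: fs) x)
            (x, (PySem.List.index? out x).getD 0))
          = (pvD out []).flatMap (fun x => List.replicate (PySem.List.count fs x)
            (x, (PySem.List.index? out x).getD 0)) := by
        refine List.flatMap_congr (fun x hx => ?_)
        have hxo : x ∈ out := ((mem_pvD _ _ _).mp hx).1
        have hne : ¬ (f = x) := fun h => hfo (h ▸ hxo)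
        simp [PySem.List.count_eq, hne]
      rw [hcongr, List.filter_cons_of_neg (by simpa using hc)]
      exact ih

-- constant blocks over strictly increasing indices are ≤-sorted
lemma flat_pairwise (idx cnt : String → Nat) :
    ∀ (ds : List String), ds.Pairwise (fun a b => idx a < idx b) →
    (ds.flatMap (fun x => List.replicate (cnt x) (idx x))).Pairwise (· ≤ ·) := by
  intro ds
  induction ds with
  | nil => simp
  | cons x ds ih =>
    intro hp
    rw [List.flatMap_cons, List.pairwise_append]
    refine ⟨?_, ih hp.of_cons, ?_⟩
    · rw [List.pairwise_replicate]; right; exact le_refl _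
    · intro a ha b hb
      obtain ⟨y, hy, hb'⟩ := List.mem_flatMap.mp hb
      rw [List.eq_of_mem_replicate ha, List.eq_of_mem_replicate hb']
      exact le_of_lt (List.rel_of_pairwise_cons hp hy)

-- stable sort of the pair list = B's grouped list (keys pin the strings)
lemma pv_main (out files : List String) :
    (PySem.List.sorted ((files.filter (fun f => out.contains f)).map
        (fun f => (f, (PySem.List.index? out f).getD 0))) (fun x => x.2) false).map (fun x => x.1)
    = (pvD out []).flatMap (fun x => List.replicate (PySem.List.count files x) x) := by
  set Q := (files.filter (fun f => out.contains f)).map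
      (fun f => (f, (PySem.List.index? out f).getD 0)) with hQ
  set Rp := (pvD out []).flatMap (fun x =>
      List.replicate (PySem.List.count files x) (x, (PySem.List.index? out x).getD 0)) with hRp
  set S := PySem.List.sorted Q (fun x => x.2) false with hS
  have hperm : S.Perm Rp := (PySem.List.sorted_perm Q (fun x => x.2) false).trans
    (perm_Rp_Q out files).symm
  have hmemQ : ∀ p ∈ Q, PySem.List.index? out p.1 = some p.2 := by
    intro p hp
    rw [hQ] at hp
    obtain ⟨f, hf, rfl⟩ := List.mem_map.mp hp
    have hfo : f ∈ out := by simpa using (List.mem_filter.mp hf).2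
    obtain ⟨i, hi⟩ := Option.isSome_iff_exists.mp ((PySem.List.index?_isSome_iff out f).mpr hfo)
    show PySem.List.index? out f = some ((PySem.List.index? out f).getD 0)
    rw [hi]; rfl
  have hmemS : ∀ p ∈ S, PySem.List.index? out p.1 = some p.2 := by
    intro p hp
    exact hmemQ p ((PySem.List.sorted_perm Q (fun x => x.2) false).mem_iff.mp hp)
  have hmemR : ∀ p ∈ Rp, PySem.List.index? out p.1 = some p.2 := by
    intro p hp
    rw [hRp] at hp
    obtain ⟨x, hx, hp'⟩ := List.mem_flatMap.mp hp
    have hxo : x ∈ out := ((mem_pvD _ _ _).mp hx).1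
    obtain ⟨i, hi⟩ := Option.isSome_iff_exists.mp ((PySem.List.index?_isSome_iff out x).mpr hxo)
    rw [List.eq_of_mem_replicate hp']
    show PySem.List.index? out x = some ((PySem.List.index? out x).getD 0)
    rw [hi]; rfl
  have hkeys : S.map (fun p => p.2) = Rp.map (fun p => p.2) := by
    refine List.Perm.eq_of_pairwise (fun a b _ _ hab hba => le_antisymm hab hba) ?_ ?_
      (hperm.map (fun p => p.2))
    · exact PySem.List.sorted_map_key_pairwise Q (fun x => x.2)
    · rw [hRp, List.map_flatMap]
      simp only [List.map_replicate]
      exact flat_pairwise _ _ _ (by simpa using pvD_pairwise_idx out [] [] (by simp))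
  have hdet : ∀ (l : List (String × Nat)), (∀ p ∈ l, PySem.List.index? out p.1 = some p.2) →
      l.map (fun p => p.1) = (l.map (fun p => p.2)).map (fun k => out.getD k "") := by
    intro l hl
    rw [List.map_map]
    refine List.map_congr_left (fun p hp => ?_)
    obtain ⟨hk, hval, -⟩ := PySem.List.getElem_of_index?_eq_some (hl p hp)
    simp only [Function.comp]
    rw [List.getD_eq_getElem _ _ hk, hval]
  rw [hdet S hmemS, hkeys, ← hdet Rp hmemR, hRp, List.map_flatMap]
  simp [List.map_replicate]

-- ===== VERDICT (by name: the statement is the Claim_ definition above) =====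
theorem get_list_order_by_id_spec : Claim_equal_get_list_order_by_id := by
  intro out files _
  unfold Spec_get_list_order_by_id get_list_order_by_id get_list_order_by_id_alt
  rw [foldB_eq files out [] []]
  simp only [foldA_eq out files [], List.nil_append]
  exact pv_main out files
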